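-- pv_equiv track=rewrite | github.com/lovelysi0113/Algorithm_Problems | Programmers/LEVEL_2/42586-기능개발.py | solution
-- ===== SOURCE A (Python) =====
-- import math
--
-- def solution(progresses, speeds):
--     days = [math.ceil((100-progresses[idx]) / speeds[idx]) for idx in range(len(progresses))]
--
--     answer = []
--     while days:
--         out = days.pop(0)
--         cnt = 1
--         while days and days[0] <= out:
--             days.pop(0)
--             cnt += 1
--         answer.append(cnt)
--
--     return answer
-- ===== SOURCE B (Python) =====
-- import math
--
-- def solution(progresses, speeds):
--     answer = []
--     leader = None
--     cnt = 0
--     for p, s in zip(progresses, speeds):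
--         d = math.ceil((100 - p) / s)
--         if leader is None or d > leader:
--             if cnt:
--                 answer.append(cnt)
--             leader, cnt = d, 1
--         else:
--             cnt += 1
--     if cnt:
--         answer.append(cnt)
--     return answer
-- ===== Notes on version B (the rewrite author's own statement) =====
-- stated objective: faster
-- what changed: Replaces A's build-a-days-list-then-repeatedly-pop(0) grouping (each pop shifts the whole list) with a single forward pass over zip(progresses, speeds) keeping only a running group leader and count.
-- outside the precondition, e.g. on solution([50], [0]): A raises ZeroDivisionError, B raises ZeroDivisionError; on solution([50, 50], [5]): A raises IndexError, B returns [1]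
import Mathlib
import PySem

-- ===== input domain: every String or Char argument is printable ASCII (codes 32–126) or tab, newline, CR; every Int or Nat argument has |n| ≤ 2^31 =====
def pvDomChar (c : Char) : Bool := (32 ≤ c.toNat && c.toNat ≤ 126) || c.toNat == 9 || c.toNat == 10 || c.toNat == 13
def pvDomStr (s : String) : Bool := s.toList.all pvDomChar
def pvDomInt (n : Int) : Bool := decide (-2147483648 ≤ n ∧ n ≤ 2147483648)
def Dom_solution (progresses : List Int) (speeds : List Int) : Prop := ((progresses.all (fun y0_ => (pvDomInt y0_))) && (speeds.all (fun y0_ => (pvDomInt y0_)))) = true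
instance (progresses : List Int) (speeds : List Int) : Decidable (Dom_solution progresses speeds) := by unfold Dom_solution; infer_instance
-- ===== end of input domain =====

-- B changes A's repeated days.pop(0) grouping into a single forward pass with a running
-- group leader and count (objective: faster, one pass instead of quadratic pops).

-- ===== PORT A =====
-- math.ceil((100-p)/s) is exact integer ceiling division on Dom (|ints| ≤ 2^31, where the
-- float quotient's ceiling equals the exact one): ported as -((-a) // s).
def ceilA (a s : Int) : Int := -(PySem.Int.floordiv (-a) s)

-- inner 'while days and days[0] <= out: pop; cnt += 1' : returns (cnt starting from 1, remaining days)
def popLeA (out : Int) : List Int → Int × List Int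
  | [] => (1, [])
  | d :: ds =>
    if d ≤ out then
      let r := popLeA out ds
      (r.1 + 1, r.2)
    else (1, d :: ds)

theorem popLeA_len (out : Int) (ds : List Int) : (popLeA out ds).2.length ≤ ds.length := by
  induction ds with
  | nil => simp [popLeA]
  | cons d ds ih =>
    simp only [popLeA]
    split
    · exact le_trans ih (by simp)
    · simp

-- outer 'while days' loop
def groupA : List Int → List Int
  | [] => []
  | d :: ds =>
    let r := popLeA d ds
    r.1 :: groupA r.2
  termination_by ds => ds.length
  decreasing_by
    have := popLeA_len d ds
    simp only [List.length_cons]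
    omega

def solution (progresses : List Int) (speeds : List Int) : List Int :=
  groupA ((PySem.List.pyRange 0 progresses.length 1).map
    (fun idx => ceilA (100 - PySem.List.pyGetD progresses idx 0) (PySem.List.pyGetD speeds idx 0)))

-- ===== PORT B =====
-- one loop step of Source B: state (answer, leader, cnt), day value d
def stepB (st : List Int × Option Int × Int) (d : Int) : List Int × Option Int × Int :=
  match st with
  | (answer, leader, cnt) =>
    match leader with
    | none => ((if cnt ≠ 0 then answer ++ [cnt] else answer), some d, 1)
    | some ld =>
      if ld < d then ((if cnt ≠ 0 then answer ++ [cnt] else answer), some d, 1)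
      else (answer, some ld, cnt + 1)

def solution_alt (progresses : List Int) (speeds : List Int) : List Int :=
  let r := (progresses.zip speeds).foldl
    (fun st x => stepB st (-(PySem.Int.floordiv (-(100 - x.1)) x.2))) ([], none, 0)
  if r.2.2 ≠ 0 then r.1 ++ [r.2.2] else r.1

-- ===== PRECONDITION & SPEC =====
-- Pre_ excludes exactly the inputs on which Python A raises: an index beyond speeds
-- (IndexError when speeds is shorter than progresses) or a zero speed actually used
-- (ZeroDivisionError).
def Pre_solution (progresses : List Int) (speeds : List Int) : Prop :=
  progresses.length ≤ speeds.length ∧ (0 : Int) ∉ speeds.take progresses.length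
instance (progresses : List Int) (speeds : List Int) : Decidable (Pre_solution progresses speeds) := by
  unfold Pre_solution; infer_instance

def pvWitness_solution : List Int × List Int := ([93, 30, 55], [1, 30, 5])

def Spec_solution (progresses : List Int) (speeds : List Int) (out : List Int) : Prop := out = solution_alt progresses speeds
instance (progresses : List Int) (speeds : List Int) (out : List Int) : Decidable (Spec_solution progresses speeds out) := by unfold Spec_solution; infer_instance

-- ===== CLAIM (what is proved, stated in full; the proofs are below) =====
def Claim_equal_solution : Prop := ∀ (progresses : List Int) (speeds : List Int), Dom_solution progresses speeds → Pre_solution progresses speeds → Spec_solution progresses speeds (solution progresses speeds)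

-- ===== LEMMAS AND PROOFS =====

theorem groupA_nil : groupA [] = [] := by rw [groupA.eq_def]

theorem groupA_cons (d : Int) (ds : List Int) :
    groupA (d :: ds) = (popLeA d ds).1 :: groupA (popLeA d ds).2 := by rw [groupA.eq_def]

-- A's index-based days comprehension equals the map over the zipped lists
theorem rangeMap_eq_zipMap (g : Int → Int → Int) :
    ∀ (p s : List Int), p.length ≤ s.length →
    (List.range p.length).map (fun k => g (p.getD k 0) (s.getD k 0))
      = (p.zip s).map (fun x => g x.1 x.2) := by
  intro p
  induction p with
  | nil => intro s _; simp
  | cons a p ih =>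
    intro s hs
    cases s with
    | nil => simp at hs
    | cons b s =>
      simp only [List.length_cons, List.range_succ_eq_map, List.map_cons, List.map_map,
        List.zip_cons_cons, List.getD_cons_zero]
      congr 1
      rw [← ih s (by simpa using hs)]
      apply List.map_congr_left
      intro k _
      simp

def finishB (r : List Int × Option Int × Int) : List Int :=
  if r.2.2 ≠ 0 then r.1 ++ [r.2.2] else r.1

-- invariant of B's loop: with leader ld and running count cnt ≥ 1 it produces A's groups
theorem stepB_inv : ∀ (ds : List Int) (ans : List Int) (ld cnt : Int), 0 < cnt →
    finishB (ds.foldl stepB (ans, some ld, cnt))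
      = ans ++ ((cnt - 1 + (popLeA ld ds).1) :: groupA (popLeA ld ds).2) := by
  intro ds
  induction ds with
  | nil =>
    intro ans ld cnt hc
    simp only [List.foldl_nil, finishB, popLeA]
    rw [groupA_nil]
    have h1 : cnt - 1 + 1 = cnt := by omega
    have h2 : cnt ≠ 0 := by omega
    simp [h1, h2]
  | cons d ds ih =>
    intro ans ld cnt hc
    simp only [List.foldl_cons]
    by_cases h : ld < d
    · have hle : ¬ d ≤ ld := by omega
      have hcnt : cnt ≠ 0 := by omega
      simp only [stepB, if_pos h, hcnt, ne_eq, not_false_iff, if_true]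
      rw [ih (ans ++ [cnt]) d 1 (by omega)]
      simp only [popLeA, if_neg hle]
      rw [groupA_cons]
      have h2 : cnt - 1 + 1 = cnt := by omega
      simp [h2]
    · have hle : d ≤ ld := by omega
      simp only [stepB, if_neg h]
      rw [ih ans ld (cnt + 1) (by omega)]
      simp only [popLeA, if_pos hle]
      have h1 : cnt + 1 - 1 + (popLeA ld ds).1 = cnt - 1 + ((popLeA ld ds).1 + 1) := by omega
      rw [h1]

theorem foldB_eq_groupA (ds : List Int) :
    finishB (ds.foldl stepB ([], none, 0)) = groupA ds := by
  cases ds with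
  | nil => rw [groupA_nil]; simp [finishB]
  | cons d ds =>
    simp only [List.foldl_cons, stepB]
    rw [stepB_inv ds _ d 1 (by omega), groupA_cons]
    simp

-- ===== VERDICT (by name: the statement is the Claim_ definition above) =====
theorem solution_spec : Claim_equal_solution := by
  intro p s _hdom hpre
  obtain ⟨hlen, _⟩ := hpre
  unfold Spec_solution solution solution_alt
  have hmap : (PySem.List.pyRange 0 p.length 1).map
      (fun idx => ceilA (100 - PySem.List.pyGetD p idx 0) (PySem.List.pyGetD s idx 0))
      = (p.zip s).map (fun x => ceilA (100 - x.1) x.2) := by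
    rw [PySem.List.pyRange_one]
    simp only [sub_zero, Int.toNat_natCast, List.map_map]
    have := rangeMap_eq_zipMap (fun a b => ceilA (100 - a) b) p s hlen
    rw [← this]
    apply List.map_congr_left
    intro k _
    simp [PySem.List.pyGetD_natCast]
  rw [hmap]
  have : (p.zip s).foldl (fun st x => stepB st (-(PySem.Int.floordiv (-(100 - x.1)) x.2))) ([], none, 0)
      = ((p.zip s).map (fun x => ceilA (100 - x.1) x.2)).foldl stepB ([], none, 0) := by
    rw [List.foldl_map]
    rfl
  rw [this]
  exact (foldB_eq_groupA _).symm
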